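-- pv_equiv track=rewrite | github.com/swetha2811/DSA0319-NLP | 5-fsa.py | equal_number_of_ones_and_zeros
-- ===== SOURCE A (Python) =====
-- def equal_number_of_ones_and_zeros(string):
--     count_ones = 0
--     count_zeros = 0
--
--     for char in string:
--         if char == '1':
--             count_ones += 1
--         elif char == '0':
--             count_zeros += 1
--         else:
--             return False
--
--     return count_ones == count_zeros
-- ===== SOURCE B (Python) =====
-- def equal_number_of_ones_and_zeros(string):
--     half, rem = divmod(len(string), 2)
--     return rem == 0 and sorted(string) == ['0'] * half + ['1'] * half
-- ===== Notes on version B (the rewrite author's own statement) =====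
-- stated objective: alternative
-- what changed: Replaces A's per-character counting loop with a sort-and-compare: the string is balanced binary iff its length is even and its sorted character list equals half zeros followed by half ones.
import Mathlib
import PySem

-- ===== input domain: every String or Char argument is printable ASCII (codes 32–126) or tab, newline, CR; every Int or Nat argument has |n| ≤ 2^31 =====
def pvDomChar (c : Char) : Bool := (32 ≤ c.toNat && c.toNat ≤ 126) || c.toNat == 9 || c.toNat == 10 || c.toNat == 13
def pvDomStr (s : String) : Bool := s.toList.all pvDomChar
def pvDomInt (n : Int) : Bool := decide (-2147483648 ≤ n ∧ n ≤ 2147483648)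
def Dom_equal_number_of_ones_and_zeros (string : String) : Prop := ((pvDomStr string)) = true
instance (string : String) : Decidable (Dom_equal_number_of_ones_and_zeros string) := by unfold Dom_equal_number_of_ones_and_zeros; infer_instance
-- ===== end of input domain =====

-- B replaces A's early-exiting counting loop with sort-and-compare: the string is balanced
-- binary iff its length is even and sorted(string) is half '0's followed by half '1's
-- (objective: alternative algorithm).

-- ===== PORT A =====
-- the for-loop with early 'return False': structural recursion over the characters,
-- carrying the two counters
def eqozLoop : List Char → Int → Int → Bool
  | [], countOnes, countZeros => countOnes == countZeros
  | c :: rest, countOnes, countZeros =>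
      if c == '1' then eqozLoop rest (countOnes + 1) countZeros
      else if c == '0' then eqozLoop rest countOnes (countZeros + 1)
      else false

def equal_number_of_ones_and_zeros (string : String) : Bool :=
  eqozLoop string.toList 0 0

-- ===== PORT B =====
-- half, rem = divmod(len(string), 2); rem == 0 and sorted(string) == ['0']*half + ['1']*half
-- ['0'] * half is List.replicate half.toNat '0' (exact: half ≥ 0 here)
def equal_number_of_ones_and_zeros_alt (string : String) : Bool :=
  match PySem.Int.divmod? (string.toList.length : Int) 2 with
  | none => false  -- unreachable: the divisor 2 is nonzero
  | some (half, rem) =>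
      rem == 0 &&
        (PySem.List.sorted string.toList (fun c => c) false ==
          List.replicate half.toNat '0' ++ List.replicate half.toNat '1')

-- ===== PRECONDITION & SPEC =====
def Spec_equal_number_of_ones_and_zeros (string : String) (out : Bool) : Prop := out = equal_number_of_ones_and_zeros_alt string
instance (string : String) (out : Bool) : Decidable (Spec_equal_number_of_ones_and_zeros string out) := by unfold Spec_equal_number_of_ones_and_zeros; infer_instance

-- ===== CLAIM =====
def Claim_equal_equal_number_of_ones_and_zeros : Prop := ∀ (string : String), Dom_equal_number_of_ones_and_zeros string → Spec_equal_number_of_ones_and_zeros string (equal_number_of_ones_and_zeros string)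

-- ===== LEMMAS AND PROOFS =====

-- characterisation of A's loop: false on any foreign character, otherwise compares totals
theorem eqozLoop_eq (l : List Char) (o z : Int) :
    eqozLoop l o z =
      if l.all (fun c => c == '1' || c == '0') then
        decide (o + (l.count '1' : Int) = z + (l.count '0' : Int))
      else false := by
  induction l generalizing o z with
  | nil =>
      apply Bool.eq_iff_iff.mpr
      simp [eqozLoop]
  | cons c t ih =>
      by_cases h1 : c = '1'
      · subst h1
        simp [eqozLoop, ih]
        congr 1
        simp only [decide_eq_decide]
        omega
      · by_cases h0 : c = '0'
        · subst h0
          simp [eqozLoop, h1, ih]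
          congr 1
          simp only [decide_eq_decide]
          omega
        · simp [eqozLoop, h1, h0]

-- the pattern halfZeros ++ halfOnes is weakly sorted
theorem pattern_pairwise (k : Nat) :
    (List.replicate k '0' ++ List.replicate k '1').Pairwise (· ≤ ·) := by
  apply List.pairwise_append.mpr
  refine ⟨List.pairwise_replicate.mpr (by simp), List.pairwise_replicate.mpr (by simp), ?_⟩
  intro a ha b hb
  rw [List.eq_of_mem_replicate ha, List.eq_of_mem_replicate hb]
  decide

-- A's condition (valid alphabet + equal counts) says exactly that the string is a
-- permutation of the pattern with k = count '1'
theorem perm_pattern (l : List Char)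
    (hall : l.all (fun c => c == '1' || c == '0') = true)
    (hcnt : l.count '1' = l.count '0') :
    l.Perm (List.replicate (l.count '1') '0' ++ List.replicate (l.count '1') '1') := by
  apply List.perm_iff_count.mpr
  intro a
  rw [List.count_append, List.count_replicate, List.count_replicate]
  by_cases h0 : a = '0'
  · subst h0; simp [hcnt.symm]
  · by_cases h1 : a = '1'
    · subst h1; simp
    · have : a ∉ l := by
        intro hmem
        have := List.all_eq_true.mp hall a hmem
        simp at this
        rcases this with h | h
        · exact h1 h
        · exact h0 h
      simp [List.count_eq_zero_of_not_mem this, Ne.symm h0, Ne.symm h1]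

theorem length_eq_counts (l : List Char)
    (hall : l.all (fun c => c == '1' || c == '0') = true) :
    l.length = l.count '1' + l.count '0' := by
  induction l with
  | nil => simp
  | cons c t ih =>
      simp only [List.all_cons, Bool.and_eq_true] at hall
      have ht := ih hall.2
      rcases Bool.or_eq_true _ _ |>.mp hall.1 with h | h
      · have : c = '1' := by simpa using h
        subst this; simp [ht]; omega
      · have : c = '0' := by simpa using h
        subst this; simp [ht]; omega

-- divmod of a nonnegative length by 2
theorem divmod_len (n : Nat) :
    PySem.Int.divmod? (n : Int) 2 = some ((n : Int) / 2, (n : Int) % 2) := by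
  unfold PySem.Int.divmod?
  rw [if_neg (by omega)]
  rw [Int.fdiv_eq_ediv, Int.fmod_eq_emod]
  simp

-- ===== VERDICT =====
theorem equal_number_of_ones_and_zeros_spec : Claim_equal_equal_number_of_ones_and_zeros := by
  intro s _
  unfold Spec_equal_number_of_ones_and_zeros equal_number_of_ones_and_zeros
    equal_number_of_ones_and_zeros_alt
  set l := s.toList with hl
  rw [eqozLoop_eq, divmod_len]
  simp only []
  apply Bool.eq_iff_iff.mpr
  constructor
  · intro h
    split_ifs at h with hall
    · have hcnt : l.count '1' = l.count '0' := by
        have := of_decide_eq_true h; omega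
      have hperm := perm_pattern l hall hcnt
      have hlen := length_eq_counts l hall
      have hhalf : (((l.length : Int)) / 2).toNat = l.count '1' := by
        omega
      simp only [Bool.and_eq_true, beq_iff_eq]
      constructor
      · have : l.length % 2 = 0 := by omega
        omega
      · rw [hhalf]
        exact PySem.List.sorted_id_eq_of_perm_of_pairwise _ _
          hperm.symm (pattern_pairwise _)
  · intro h
    simp only [Bool.and_eq_true, beq_iff_eq] at h
    obtain ⟨hrem, hsort⟩ := h
    have hperm : l.Perm (List.replicate ((l.length / 2 : Nat)) '0' ++
        List.replicate ((l.length / 2 : Nat)) '1') := by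
      have hp := PySem.List.sorted_perm l (fun c => c) false
      rw [hsort] at hp
      have : (((l.length : Int)) / 2).toNat = l.length / 2 := by omega
      rw [this] at hp
      exact hp.symm
    have hc1 : l.count '1' = l.length / 2 := by
      have := hperm.count_eq '1'
      simpa [List.count_append, List.count_replicate] using this
    have hc0 : l.count '0' = l.length / 2 := by
      have := hperm.count_eq '0'
      simpa [List.count_append, List.count_replicate] using this
    have hall : l.all (fun c => c == '1' || c == '0') = true := by
      apply List.all_eq_true.mpr
      intro c hc
      have : c ∈ List.replicate ((l.length / 2 : Nat)) '0' ++
          List.replicate ((l.length / 2 : Nat)) '1' := hperm.mem_iff.mp hc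
      rcases List.mem_append.mp this with h | h <;>
        simp [List.eq_of_mem_replicate h]
    rw [if_pos hall]
    simp [hc1, hc0]
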